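-- pv_equiv track=rewrite | github.com/Tharunn25/ccc-exit-test | In a Square Grid.py | onesGroups
-- ===== SOURCE A (Python) =====
-- def onesGroups(grid, queries):
--     n = len(grid)
--     visited = [[False]*n for _ in range(n)]
--     groups = []
--
--     def dfs(r, c, group):
--         visited[r][c] = True
--         group.append((r,c))
--         for dr, dc in [(1,0), (-1,0), (0,1), (0,-1)]:
--             nr, nc = r+dr, c+dc
--             if nr>=0 and nr<n and nc>=0 and nc<n and grid[nr][nc]==1 and not visited[nr][nc]:
--                 dfs(nr, nc, group)
--
--     # find all groups of connected 1's
--     for r in range(n):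
--         for c in range(n):
--             if grid[r][c] == 1 and not visited[r][c]:
--                 group = []
--                 dfs(r, c, group)
--                 groups.append(group)
--
--     # count number of groups with sizes that match each query
--     res = []
--     for q in queries:
--         count = sum(1 for group in groups if len(group) == q)
--         res.append(count)
--
--     return res
-- ===== SOURCE B (Python) =====
-- def onesGroups(grid, queries):
--     n = len(grid)
--     visited = [[False] * n for _ in range(n)]
--     size_count = {}
--     for r in range(n):
--         for c in range(n):
--             if grid[r][c] == 1 and not visited[r][c]:
--                 size = 0
--                 stack = [(r, c)]
--                 while stack:
--                     cr, cc = stack.pop()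
--                     if (cr < 0 or cr >= n or cc < 0 or cc >= n
--                             or grid[cr][cc] != 1 or visited[cr][cc]):
--                         continue
--                     visited[cr][cc] = True
--                     size += 1
--                     stack.extend(((cr, cc - 1), (cr, cc + 1), (cr - 1, cc), (cr + 1, cc)))
--                 size_count[size] = size_count.get(size, 0) + 1
--     return [size_count.get(q, 0) for q in queries]
-- ===== Notes on version B (the rewrite author's own statement) =====
-- stated objective: faster
-- what changed: Replaces the recursive DFS that collects coordinate lists plus a per-query scan over all groups with an explicit-stack flood fill that only counts sizes into a dict built once, so each query becomes a single dict lookup.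
import Mathlib
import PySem

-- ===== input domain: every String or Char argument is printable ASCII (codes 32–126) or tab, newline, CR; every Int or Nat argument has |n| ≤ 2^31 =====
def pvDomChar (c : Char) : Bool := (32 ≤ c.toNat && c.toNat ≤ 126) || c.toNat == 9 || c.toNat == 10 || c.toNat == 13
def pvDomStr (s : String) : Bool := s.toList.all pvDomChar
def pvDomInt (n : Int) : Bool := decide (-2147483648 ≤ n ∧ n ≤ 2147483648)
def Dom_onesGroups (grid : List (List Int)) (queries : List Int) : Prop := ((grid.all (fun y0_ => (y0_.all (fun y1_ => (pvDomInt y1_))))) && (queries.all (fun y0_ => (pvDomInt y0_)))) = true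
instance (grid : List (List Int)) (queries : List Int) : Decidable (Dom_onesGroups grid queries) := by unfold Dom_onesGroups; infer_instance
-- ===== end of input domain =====

-- B (objective: faster, measured) replaces A's recursive DFS (coordinate lists + a per-query scan
-- over all groups) by an explicit-stack flood fill counting component sizes into a dict built once,
-- making each query a single lookup; return values agree.


-- Shared cell-access helpers (exact for the in-range indices both programs use: 0 ≤ r,c < n).
def pvCell (grid : List (List Int)) (r c : Int) : Int := (grid.getD r.toNat []).getD c.toNat 0

def pvVis (v : List (List Bool)) (r c : Int) : Bool := (v.getD r.toNat []).getD c.toNat true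

def pvMark (v : List (List Bool)) (r c : Int) : List (List Bool) :=
  v.set r.toNat ((v.getD r.toNat []).set c.toNat true)

-- the compound guard `0<=nr<n and 0<=nc<n and grid[nr][nc]==1 and not visited[nr][nc]`
def pvElig (grid : List (List Int)) (n : Int) (v : List (List Bool)) (r c : Int) : Bool :=
  decide (0 ≤ r) && decide (r < n) && decide (0 ≤ c) && decide (c < n) &&
    (pvCell grid r c == 1) && !(pvVis v r c)

-- number of unvisited entries: termination measure / fuel bound for the traversals
def pvUnvis (v : List (List Bool)) : Nat := (v.map (fun row => row.count false)).sum

theorem pvVis_false_of_elig {grid : List (List Int)} {n : Int} {v : List (List Bool)} {r c : Int}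
    (h : pvElig grid n v r c = true) : pvVis v r c = false := by
  simp [pvElig] at h; simpa using h.2

theorem count_false_set_true_lt (row : List Bool) (j : Nat) (h : row.getD j true = false) :
    (row.set j true).count false < row.count false := by
  induction row generalizing j with
  | nil => simp at h
  | cons b t ih =>
    cases j with
    | zero =>
      simp only [List.getD_cons_zero] at h; subst h
      simp
    | succ j =>
      simp only [List.getD_cons_succ] at h
      simp only [List.set_cons_succ, List.count_cons]
      have := ih j h
      omega

theorem pvUnvis_mark_lt (v : List (List Bool)) (r c : Int) (h : pvVis v r c = false) :
    pvUnvis (pvMark v r c) < pvUnvis v := by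
  unfold pvVis at h
  unfold pvMark pvUnvis
  generalize r.toNat = i at *
  generalize c.toNat = j at *
  induction v generalizing i with
  | nil => simp at h
  | cons row t ih =>
    cases i with
    | zero =>
      simp only [List.getD_cons_zero] at h
      simp only [List.set_cons_zero, List.map_cons, List.sum_cons]
      exact Nat.add_lt_add_right (count_false_set_true_lt row j h) _
    | succ i =>
      simp only [List.getD_cons_succ] at h
      simp only [List.set_cons_succ, List.map_cons, List.sum_cons]
      exact Nat.add_lt_add_left (ih i h) _

-- ===== PORT A =====
-- fuel (a totality device; callers pass pvUnvis v, always sufficient) drives termination of the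
-- literal recursive dfs; dfsAFold is the `for dr, dc in [...]` loop of dfs.
mutual
def dfsA (grid : List (List Int)) (n : Int) (fuel : Nat) (r c : Int)
    (s : List (List Bool) × List (Int × Int)) : List (List Bool) × List (Int × Int) :=
  match fuel with
  | 0 => s
  | fuel' + 1 =>
    dfsAFold grid n fuel' [((1 : Int), (0 : Int)), (-1, 0), (0, 1), (0, -1)]
      (pvMark s.1 r c, s.2 ++ [(r, c)]) r c
termination_by 6 * fuel

def dfsAFold (grid : List (List Int)) (n : Int) (fuel : Nat) (ds : List (Int × Int))
    (s : List (List Bool) × List (Int × Int)) (r c : Int) : List (List Bool) × List (Int × Int) :=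
  match ds with
  | [] => s
  | d :: ds' =>
    dfsAFold grid n fuel ds'
      (if pvElig grid n s.1 (r + d.1) (c + d.2) then dfsA grid n fuel (r + d.1) (c + d.2) s else s)
      r c
termination_by 6 * fuel + ds.length
end

def onesGroups (grid : List (List Int)) (queries : List Int) : List Int :=
  let n : Int := (grid.length : Int)
  let v0 := List.replicate grid.length (List.replicate grid.length false)
  let st :=
    (PySem.List.pyRange 0 n 1).foldl (fun s r =>
      (PySem.List.pyRange 0 n 1).foldl (fun (s : List (List Bool) × List (List (Int × Int))) c =>
        if pvCell grid r c == 1 && !pvVis s.1 r c then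
          let res := dfsA grid n (pvUnvis s.1) r c (s.1, [])
          (res.1, s.2 ++ [res.2])
        else s) s) (v0, [])
  queries.foldl (fun res q =>
    res ++ [((st.2.map (fun g => if ((g.length : Int) == q) then (1 : Int) else 0)).sum)]) []

-- ===== PORT B =====
-- explicit-stack flood fill (list head = top of Python's stack); counts, never collects, cells
def floodB (grid : List (List Int)) (n : Int) (st : List (Int × Int)) (v : List (List Bool))
    (k : Int) : List (List Bool) × Int :=
  match st with
  | [] => (v, k)
  | (cr, cc) :: st' =>
    if h : pvElig grid n v cr cc = true then
      floodB grid n ((cr + 1, cc) :: (cr - 1, cc) :: (cr, cc + 1) :: (cr, cc - 1) :: st')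
        (pvMark v cr cc) (k + 1)
    else
      floodB grid n st' v k
termination_by (pvUnvis v, st.length)
decreasing_by
  · exact Prod.Lex.left _ _ (pvUnvis_mark_lt v cr cc (pvVis_false_of_elig h))
  · exact Prod.Lex.right _ (by simp)

def onesGroups_alt (grid : List (List Int)) (queries : List Int) : List Int :=
  let n : Int := (grid.length : Int)
  let v0 := List.replicate grid.length (List.replicate grid.length false)
  let st :=
    (PySem.List.pyRange 0 n 1).foldl (fun s r =>
      (PySem.List.pyRange 0 n 1).foldl (fun (s : List (List Bool) × PySem.Dict Int Int) c =>
        if pvCell grid r c == 1 && !pvVis s.1 r c then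
          let fl := floodB grid n [(r, c)] s.1 0
          (fl.1, s.2.insert fl.2 (s.2.getD fl.2 0 + 1))
        else s) s) (v0, PySem.Dict.empty)
  queries.map (fun q => st.2.getD q 0)

-- ===== PRECONDITION & SPEC =====
-- Pre_ excludes exactly the grids on which A raises IndexError: some row shorter than the grid
-- (A reads grid[r][c] for all r, c < len(grid)).
def Pre_onesGroups (grid : List (List Int)) (queries : List Int) : Prop :=
  ∀ row ∈ grid, grid.length ≤ row.length
instance (grid : List (List Int)) (queries : List Int) : Decidable (Pre_onesGroups grid queries) := by
  unfold Pre_onesGroups; infer_instance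

def pvWitness_onesGroups : List (List Int) × List Int := ([[1, 0], [1, 1]], [1, 3, 2])

def Spec_onesGroups (grid : List (List Int)) (queries : List Int) (out : List Int) : Prop := out = onesGroups_alt grid queries
instance (grid : List (List Int)) (queries : List Int) (out : List Int) : Decidable (Spec_onesGroups grid queries out) := by unfold Spec_onesGroups; infer_instance

-- ===== CLAIM (what is proved, stated in full; the proofs are below) =====
def Claim_equal_onesGroups : Prop := ∀ (grid : List (List Int)) (queries : List Int), Dom_onesGroups grid queries → Pre_onesGroups grid queries → Spec_onesGroups grid queries (onesGroups grid queries)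

-- ===== LEMMAS AND PROOFS =====

theorem count_false_set_true_le (row : List Bool) (j : Nat) :
    (row.set j true).count false ≤ row.count false := by
  induction row generalizing j with
  | nil => simp
  | cons b t ih =>
    cases j with
    | zero => cases b <;> simp
    | succ j => simp only [List.set_cons_succ, List.count_cons]; have := ih j; omega

theorem pvUnvis_mark_le (v : List (List Bool)) (r c : Int) :
    pvUnvis (pvMark v r c) ≤ pvUnvis v := by
  unfold pvMark pvUnvis
  generalize r.toNat = i
  generalize c.toNat = j
  induction v generalizing i with
  | nil => simp
  | cons row t ih =>
    cases i with
    | zero =>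
      simp only [List.getD_cons_zero, List.set_cons_zero, List.map_cons, List.sum_cons]
      exact Nat.add_le_add_right (count_false_set_true_le row j) _
    | succ i =>
      simp only [List.getD_cons_succ, List.set_cons_succ, List.map_cons, List.sum_cons]
      exact Nat.add_le_add_left (ih i) _

theorem pvUnvis_pos_of_vis_false (v : List (List Bool)) (r c : Int) (h : pvVis v r c = false) :
    0 < pvUnvis v :=
  Nat.lt_of_le_of_lt (Nat.zero_le _) (pvUnvis_mark_lt v r c h)

theorem dfsA_frame_fold (grid : List (List Int)) (n : Int) (fuel : Nat)
    (hP : ∀ r c v g, dfsA grid n fuel r c (v, g) =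
      ((dfsA grid n fuel r c (v, [])).1, g ++ (dfsA grid n fuel r c (v, [])).2)) :
    ∀ (ds : List (Int × Int)) (r c : Int) v g, dfsAFold grid n fuel ds (v, g) r c =
      ((dfsAFold grid n fuel ds (v, []) r c).1, g ++ (dfsAFold grid n fuel ds (v, []) r c).2) := by
  intro ds
  induction ds with
  | nil => intro r c v g; simp [dfsAFold]
  | cons d ds' ih =>
    intro r c v g
    rw [dfsAFold, dfsAFold]
    by_cases he : pvElig grid n v (r + d.1) (c + d.2) = true
    · simp only [he, if_true]
      have hX : dfsA grid n fuel (r + d.1) (c + d.2) (v, []) =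
          ((dfsA grid n fuel (r + d.1) (c + d.2) (v, [])).1,
           (dfsA grid n fuel (r + d.1) (c + d.2) (v, [])).2) := rfl
      rw [hP (r + d.1) (c + d.2) v g, hX,
        ih r c (dfsA grid n fuel (r + d.1) (c + d.2) (v, [])).1
          (g ++ (dfsA grid n fuel (r + d.1) (c + d.2) (v, [])).2),
        ih r c (dfsA grid n fuel (r + d.1) (c + d.2) (v, [])).1
          (dfsA grid n fuel (r + d.1) (c + d.2) (v, [])).2]
      simp
    · simp only [he]
      exact ih r c v g

theorem dfsA_frame (grid : List (List Int)) (n : Int) (fuel : Nat) :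
    ∀ r c v g, dfsA grid n fuel r c (v, g) =
      ((dfsA grid n fuel r c (v, [])).1, g ++ (dfsA grid n fuel r c (v, [])).2) := by
  induction fuel with
  | zero => intro r c v g; simp [dfsA]
  | succ f ih =>
    intro r c v g
    rw [dfsA, dfsA]
    simp only []
    rw [dfsA_frame_fold grid n f ih [((1 : Int), (0 : Int)), (-1, 0), (0, 1), (0, -1)] r c
          (pvMark v r c) (g ++ [(r, c)]),
        dfsA_frame_fold grid n f ih [((1 : Int), (0 : Int)), (-1, 0), (0, 1), (0, -1)] r c
          (pvMark v r c) ([] ++ [(r, c)])]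
    simp

theorem dfsAFold_frame (grid : List (List Int)) (n : Int) (fuel : Nat) :
    ∀ (ds : List (Int × Int)) (r c : Int) v g, dfsAFold grid n fuel ds (v, g) r c =
      ((dfsAFold grid n fuel ds (v, []) r c).1, g ++ (dfsAFold grid n fuel ds (v, []) r c).2) :=
  dfsA_frame_fold grid n fuel (dfsA_frame grid n fuel)

theorem dfsA_unvis_le_fold (grid : List (List Int)) (n : Int) (fuel : Nat)
    (hP : ∀ r c v g, pvUnvis (dfsA grid n fuel r c (v, g)).1 ≤ pvUnvis v) :
    ∀ (ds : List (Int × Int)) (r c : Int) v g,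
      pvUnvis (dfsAFold grid n fuel ds (v, g) r c).1 ≤ pvUnvis v := by
  intro ds
  induction ds with
  | nil => intro r c v g; simp [dfsAFold]
  | cons d ds' ih =>
    intro r c v g
    rw [dfsAFold]
    by_cases he : pvElig grid n v (r + d.1) (c + d.2) = true
    · simp only [he, if_true]
      rw [dfsA_frame]
      exact le_trans (ih r c _ _) (hP (r + d.1) (c + d.2) v [])
    · simp only [he]
      exact ih r c v g

theorem dfsA_unvis_le (grid : List (List Int)) (n : Int) (fuel : Nat) :
    ∀ r c v g, pvUnvis (dfsA grid n fuel r c (v, g)).1 ≤ pvUnvis v := by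
  induction fuel with
  | zero => intro r c v g; simp [dfsA]
  | succ f ih =>
    intro r c v g
    rw [dfsA]
    exact le_trans
      (dfsA_unvis_le_fold grid n f ih [((1 : Int), (0 : Int)), (-1, 0), (0, 1), (0, -1)] r c
        (pvMark v r c) (g ++ [(r, c)]))
      (pvUnvis_mark_le v r c)

theorem flood_sim (grid : List (List Int)) (n : Int) (N : Nat) :
    ∀ v : List (List Bool), pvUnvis v ≤ N → ∀ (r c : Int) (st : List (Int × Int)) (k : Int)
      (fuel : Nat), pvUnvis v ≤ fuel →
      floodB grid n ((r, c) :: st) v k =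
        if pvElig grid n v r c then
          floodB grid n st (dfsA grid n fuel r c (v, [])).1
            (k + ((dfsA grid n fuel r c (v, [])).2.length : Int))
        else floodB grid n st v k := by
  induction N using Nat.strong_induction_on with
  | _ N IH =>
  intro v hvN r c st k fuel hvf
  by_cases he : pvElig grid n v r c = true
  · have hvis := pvVis_false_of_elig he
    have hpos := pvUnvis_pos_of_vis_false v r c hvis
    cases fuel with
    | zero => omega
    | succ f =>
      have hmlt := pvUnvis_mark_lt v r c hvis
      rw [floodB]
      simp only [he, dif_pos, if_pos]
      have hd : dfsA grid n (f + 1) r c (v, []) =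
          dfsAFold grid n f [((1 : Int), (0 : Int)), (-1, 0), (0, 1), (0, -1)]
            (pvMark v r c, [(r, c)]) r c := by rw [dfsA]; rfl
      rw [hd]
      have hfold :
          ∀ (ds : List (Int × Int)) (v' : List (List Bool)) (st' : List (Int × Int)) (k' : Int),
            pvUnvis v' < N → pvUnvis v' ≤ f →
            floodB grid n ((ds.map (fun d => (r + d.1, c + d.2))) ++ st') v' k' =
              floodB grid n st' (dfsAFold grid n f ds (v', []) r c).1
                (k' + ((dfsAFold grid n f ds (v', []) r c).2.length : Int)) := by
        intro ds
        induction ds with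
        | nil => intro v' st' k' _ _; simp [dfsAFold]
        | cons d ds' ihds =>
          intro v' st' k' hvN' hvf'
          simp only [List.map_cons, List.cons_append]
          rw [IH (pvUnvis v') (by omega) v' (le_refl _) (r + d.1) (c + d.2)
                (ds'.map (fun d => (r + d.1, c + d.2)) ++ st') k' f hvf']
          rw [dfsAFold]
          by_cases he2 : pvElig grid n v' (r + d.1) (c + d.2) = true
          · simp only [he2, if_true]
            have hle : pvUnvis (dfsA grid n f (r + d.1) (c + d.2) (v', [])).1 ≤ pvUnvis v' :=
              dfsA_unvis_le grid n f (r + d.1) (c + d.2) v' []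
            rw [ihds (dfsA grid n f (r + d.1) (c + d.2) (v', [])).1
                  st' (k' + ((dfsA grid n f (r + d.1) (c + d.2) (v', [])).2.length : Int))
                  (by omega) (by omega)]
            rw [show (dfsA grid n f (r + d.1) (c + d.2) (v', []) :
                  List (List Bool) × List (Int × Int)) =
                ((dfsA grid n f (r + d.1) (c + d.2) (v', [])).1,
                  (dfsA grid n f (r + d.1) (c + d.2) (v', [])).2) from rfl,
              dfsAFold_frame grid n f ds' r c
                (dfsA grid n f (r + d.1) (c + d.2) (v', [])).1
                (dfsA grid n f (r + d.1) (c + d.2) (v', [])).2]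
            simp only [List.length_append]
            push_cast
            ring_nf
          · simp only [he2]
            exact ihds v' st' k' hvN' hvf'
      have h4 := hfold [((1 : Int), (0 : Int)), (-1, 0), (0, 1), (0, -1)]
        (pvMark v r c) st (k + 1) (by omega) (by omega)
      simp only [List.map_cons, List.map_nil] at h4
      norm_num at h4
      rw [show (r - 1 : Int) = r + -1 from by ring, show (c - 1 : Int) = c + -1 from by ring,
        h4,
        show ([(r, c)] : List (Int × Int)) = [] ++ [(r, c)] from rfl,
        dfsAFold_frame grid n f [((1 : Int), (0 : Int)), (-1, 0), (0, 1), (0, -1)] r c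
          (pvMark v r c) ([] ++ [(r, c)])]
      simp only [List.nil_append, List.length_append, List.length_cons, List.length_nil]
      push_cast
      ring_nf
  · rw [floodB]
    simp only [he]
    simp

def pvCnt (sizes : List Int) : PySem.Dict Int Int :=
  sizes.foldl (fun d x => d.insert x (d.getD x 0 + 1)) PySem.Dict.empty

theorem pvCnt_append (sizes : List Int) (x : Int) :
    pvCnt (sizes ++ [x]) = (pvCnt sizes).insert x ((pvCnt sizes).getD x 0 + 1) := by
  simp [pvCnt, List.foldl_append]

theorem inner_inv (grid : List (List Int)) (n : Int) (r : Int) (hr : 0 ≤ r ∧ r < n) :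
    ∀ (cs : List Int), (∀ c ∈ cs, 0 ≤ c ∧ c < n) →
    ∀ (v : List (List Bool)) (gs : List (List (Int × Int))),
      (cs.foldl (fun (s : List (List Bool) × PySem.Dict Int Int) c =>
          if pvCell grid r c == 1 && !pvVis s.1 r c then
            let fl := floodB grid n [(r, c)] s.1 0
            (fl.1, s.2.insert fl.2 (s.2.getD fl.2 0 + 1))
          else s) (v, pvCnt (gs.map (fun g => (g.length : Int))))) =
      ((cs.foldl (fun (s : List (List Bool) × List (List (Int × Int))) c =>
          if pvCell grid r c == 1 && !pvVis s.1 r c then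
            let res := dfsA grid n (pvUnvis s.1) r c (s.1, [])
            (res.1, s.2 ++ [res.2])
          else s) (v, gs)).1,
        pvCnt (((cs.foldl (fun (s : List (List Bool) × List (List (Int × Int))) c =>
          if pvCell grid r c == 1 && !pvVis s.1 r c then
            let res := dfsA grid n (pvUnvis s.1) r c (s.1, [])
            (res.1, s.2 ++ [res.2])
          else s) (v, gs)).2).map (fun g => (g.length : Int)))) := by
  intro cs
  induction cs with
  | nil => intro _ v gs; simp
  | cons c cs' ih =>
    intro hb v gs
    obtain ⟨hc0, hcn⟩ := hb c (List.mem_cons_self ..)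
    simp only [List.foldl_cons]
    by_cases hg : (pvCell grid r c == 1 && !pvVis v r c) = true
    · have helig : pvElig grid n v r c = true := by
        simp at hg
        simp [pvElig, hr.1, hr.2, hc0, hcn, hg.1, hg.2]
      have hsim := flood_sim grid n (pvUnvis v) v (le_refl _) r c [] 0 (pvUnvis v) (le_refl _)
      rw [if_pos helig] at hsim
      simp only [hg, if_true]
      rw [hsim]
      rw [show floodB grid n [] (dfsA grid n (pvUnvis v) r c (v, [])).1
            (0 + ((dfsA grid n (pvUnvis v) r c (v, [])).2.length : Int)) =
          ((dfsA grid n (pvUnvis v) r c (v, [])).1,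
            (0 : Int) + ((dfsA grid n (pvUnvis v) r c (v, [])).2.length : Int)) from by
        rw [floodB]]
      have hz : (0 : Int) + ((dfsA grid n (pvUnvis v) r c (v, [])).2.length : Int) =
          ((dfsA grid n (pvUnvis v) r c (v, [])).2.length : Int) := by ring
      rw [hz]
      have := ih (fun c hc => hb c (List.mem_cons_of_mem _ hc))
        (dfsA grid n (pvUnvis v) r c (v, [])).1 (gs ++ [(dfsA grid n (pvUnvis v) r c (v, [])).2])
      rw [show (gs ++ [(dfsA grid n (pvUnvis v) r c (v, [])).2]).map
            (fun g => (g.length : Int)) =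
          gs.map (fun g => (g.length : Int)) ++
            [((dfsA grid n (pvUnvis v) r c (v, [])).2.length : Int)] from by simp] at this
      rw [pvCnt_append] at this
      exact this
    · simp only [hg]
      exact ih (fun c hc => hb c (List.mem_cons_of_mem _ hc)) v gs

theorem outer_inv (grid : List (List Int)) (n : Int) :
    ∀ (rs : List Int), (∀ r ∈ rs, 0 ≤ r ∧ r < n) →
    ∀ (v : List (List Bool)) (gs : List (List (Int × Int))),
      (rs.foldl (fun s r =>
        (PySem.List.pyRange 0 n 1).foldl (fun (s : List (List Bool) × PySem.Dict Int Int) c =>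
          if pvCell grid r c == 1 && !pvVis s.1 r c then
            let fl := floodB grid n [(r, c)] s.1 0
            (fl.1, s.2.insert fl.2 (s.2.getD fl.2 0 + 1))
          else s) s) (v, pvCnt (gs.map (fun g => (g.length : Int))))) =
      ((rs.foldl (fun s r =>
        (PySem.List.pyRange 0 n 1).foldl (fun (s : List (List Bool) × List (List (Int × Int))) c =>
          if pvCell grid r c == 1 && !pvVis s.1 r c then
            let res := dfsA grid n (pvUnvis s.1) r c (s.1, [])
            (res.1, s.2 ++ [res.2])
          else s) s) (v, gs)).1,
        pvCnt (((rs.foldl (fun s r =>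
        (PySem.List.pyRange 0 n 1).foldl (fun (s : List (List Bool) × List (List (Int × Int))) c =>
          if pvCell grid r c == 1 && !pvVis s.1 r c then
            let res := dfsA grid n (pvUnvis s.1) r c (s.1, [])
            (res.1, s.2 ++ [res.2])
          else s) s) (v, gs)).2).map (fun g => (g.length : Int)))) := by
  intro rs
  induction rs with
  | nil => intro _ v gs; simp
  | cons r rs' ih =>
    intro hb v gs
    simp only [List.foldl_cons]
    rw [inner_inv grid n r (hb r (List.mem_cons_self ..)) (PySem.List.pyRange 0 n 1)
          (fun c hc => PySem.List.mem_pyRange_one.mp hc) v gs]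
    exact ih (fun r hr => hb r (List.mem_cons_of_mem _ hr)) _ _

theorem pv_per_query (G : List (List (Int × Int))) (q : Int) :
    (G.map (fun g => if ((g.length : Int) == q) then (1 : Int) else 0)).sum =
      (pvCnt (G.map (fun g => (g.length : Int)))).getD q 0 := by
  have h2 := PySem.List.sum_map_ite_one_zero (fun g : List (Int × Int) => ((g.length : Int) == q)) G
  rw [h2, pvCnt, PySem.Dict.getD_foldl_insert_add_one]
  simp [List.count, List.countP_map]
  rfl

-- ===== VERDICT (by name: the statement is the Claim_ definition above) =====
theorem onesGroups_spec : Claim_equal_onesGroups := by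
  intro grid queries _ _
  unfold Spec_onesGroups onesGroups onesGroups_alt
  dsimp only
  have h := outer_inv grid (grid.length : Int) (PySem.List.pyRange 0 (grid.length : Int) 1)
    (fun r hr => PySem.List.mem_pyRange_one.mp hr)
    (List.replicate grid.length (List.replicate grid.length false)) []
  simp only [List.map_nil] at h
  rw [show pvCnt [] = (PySem.Dict.empty : PySem.Dict Int Int) from rfl] at h
  rw [h]
  rw [PySem.List.foldl_append_singleton_eq_map
        (fun q => ((((PySem.List.pyRange 0 (grid.length : Int) 1).foldl (fun s r =>
          (PySem.List.pyRange 0 (grid.length : Int) 1).foldl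
            (fun (s : List (List Bool) × List (List (Int × Int))) c =>
            if pvCell grid r c == 1 && !pvVis s.1 r c then
              let res := dfsA grid (grid.length : Int) (pvUnvis s.1) r c (s.1, [])
              (res.1, s.2 ++ [res.2])
            else s) s)
          (List.replicate grid.length (List.replicate grid.length false), [])).2).map
            (fun g => if ((g.length : Int) == q) then (1 : Int) else 0)).sum) queries []]
  simp only [List.nil_append]
  apply List.map_congr_left
  intro q _
  exact pv_per_query _ q
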